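-- pv_equiv track=rewrite | github.com/llqsee/O4AnI | utils/cal_grid_density.py | grid_density
-- ===== SOURCE A (Python) =====
-- def grid_density(grid):
--     rows = len(grid)
--     cols = len(grid[0])
--
--     # Initialize density matrix with same dimensions as grid
--     density_matrix = [[0 for _ in range(cols)] for _ in range(rows)]
--
--     # Loop through each cell in the grid
--     for i in range(rows):
--         for j in range(cols):
--             # Get the category of the top layer point in the current cell
--             current_category = grid[i][j]
--             same_category_count = 0
--
--             if grid[i][j] is not None:
--                 # Count how many neighbors have the same top layer category
--                 for ni, nj in get_neighbors(i, j, rows, cols):  # get_neighbors returns valid neighboring cells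
--                     if grid[ni][nj] == current_category:
--                         same_category_count += 1
--
--             # Store the count (density) in the corresponding cell in the density matrix
--             density_matrix[i][j] = same_category_count
--
--     return density_matrix
--
-- def get_neighbors(i, j, rows, cols):
--     # Define the Moore neighborhood (25 surrounding cells)
--     # neighbors = [
--     #     (i-2, j-2), (i-2, j-1), (i-2, j), (i-2, j+1), (i-2, j+2),
--     #     (i-1, j-2), (i-1, j-1), (i-1, j), (i-1, j+1), (i-1, j+2),
--     #     (i, j-2),   (i, j-1),             (i, j+1),   (i, j+2),
--     #     (i+1, j-2), (i+1, j-1), (i+1, j), (i+1, j+1), (i+1, j+2),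
--     #     (i+2, j-2), (i+2, j-1), (i+2, j), (i+2, j+1), (i+2, j+2)
--     # ]
--     neighbors = [
--         (i-1, j-1), (i-1, j), (i-1, j+1),
--         (i, j-1),             (i, j+1),
--         (i+1, j-1), (i+1, j), (i+1, j+1)
--     ]
--
--     # Filter out invalid neighbors that are out of bounds
--     valid_neighbors = [(ni, nj) for ni, nj in neighbors if is_valid(ni, nj, rows, cols)]
--
--     return valid_neighbors
--
-- def is_valid(i, j, rows, cols):
--     # Check if a neighbor is within grid bounds
--     return 0 <= i < rows and 0 <= j < cols
-- ===== SOURCE B (Python) =====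
-- OFFSETS = [(-1, -1), (-1, 0), (-1, 1), (0, -1), (0, 1), (1, -1), (1, 0), (1, 1)]
--
-- def grid_density(grid):
--     rows = len(grid)
--     cols = len(grid[0])
--     density = [[0] * cols for _ in range(rows)]
--     # Offset-major sweep: for each of the 8 directions, add an indicator over
--     # the clipped index window, so no per-cell neighbor list or bounds test.
--     for di, dj in OFFSETS:
--         for i in range(max(0, -di), rows - max(0, di)):
--             row = grid[i]
--             nrow = grid[i + di]
--             drow = density[i]
--             for j in range(max(0, -dj), cols - max(0, dj)):
--                 v = row[j]
--                 if v is not None and nrow[j + dj] == v: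
--                     drow[j] += 1
--     return density
-- ===== Notes on version B (the rewrite author's own statement) =====
-- stated objective: faster
-- what changed: A builds and bounds-filters an 8-neighbor coordinate list for every cell and scans it; B sweeps offset-major: for each of the 8 directions it adds an equality indicator over a clipped index window, so there is no per-cell neighbor list allocation and no per-neighbor bounds test.
-- outside the precondition, e.g. on grid_density([]): A raises IndexError, B raises IndexError; on grid_density([[1, 1], [1]]): A raises IndexError, B raises IndexError
import Mathlib
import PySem

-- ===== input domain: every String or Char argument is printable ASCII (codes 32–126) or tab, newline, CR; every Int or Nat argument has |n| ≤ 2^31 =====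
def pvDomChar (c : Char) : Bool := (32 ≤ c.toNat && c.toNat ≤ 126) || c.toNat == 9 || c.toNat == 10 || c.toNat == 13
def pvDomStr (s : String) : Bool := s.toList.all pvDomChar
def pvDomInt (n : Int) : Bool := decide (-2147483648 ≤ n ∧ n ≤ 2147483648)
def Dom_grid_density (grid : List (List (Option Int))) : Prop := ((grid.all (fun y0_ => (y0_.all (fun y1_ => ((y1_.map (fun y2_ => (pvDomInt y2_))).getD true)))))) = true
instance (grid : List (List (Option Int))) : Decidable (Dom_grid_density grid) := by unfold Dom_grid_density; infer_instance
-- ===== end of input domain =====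

-- B replaces A's per-cell scan of an 8-neighbor list (built and bounds-filtered for
-- every cell) by an offset-major sweep: for each of the 8 directions it adds an
-- equality indicator over the clipped index window, with no neighbor list and no
-- per-neighbor bounds test.  Same return value; measurably faster by a constant factor
-- (no per-cell list allocation or filtering).

-- ===== PORT A =====
def pvIsValid (i j rows cols : Int) : Bool :=
  decide (0 ≤ i ∧ i < rows ∧ 0 ≤ j ∧ j < cols)

def pvGetNeighbors (i j rows cols : Int) : List (Int × Int) :=
  ([(i-1, j-1), (i-1, j), (i-1, j+1),
    (i, j-1),             (i, j+1),
    (i+1, j-1), (i+1, j), (i+1, j+1)]).filter (fun p => pvIsValid p.1 p.2 rows cols)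

-- grid[i][j] for indices already validated against rows/cols (exact under Pre_)
def pvGet2 (grid : List (List (Option Int))) (i j : Int) : Option Int :=
  PySem.List.pyGetD (PySem.List.pyGetD grid i []) j none

-- A assigns each cell of the zero matrix exactly once, in row-major order, to the
-- count below; the matrix is built directly in that order.
def grid_density (grid : List (List (Option Int))) : List (List Int) :=
  let rows : Int := grid.length
  let cols : Int := (PySem.List.pyGetD grid 0 []).length
  (PySem.List.pyRange 0 rows).map (fun i =>
    (PySem.List.pyRange 0 cols).map (fun j =>
      let cur := pvGet2 grid i j
      if cur ≠ none then
        (pvGetNeighbors i j rows cols).foldl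
          (fun c p => if pvGet2 grid p.1 p.2 == cur then c + 1 else c) (0 : Int)
      else 0))

-- ===== PORT B =====
def pvOffsets : List (Int × Int) :=
  [(-1, -1), (-1, 0), (-1, 1), (0, -1), (0, 1), (1, -1), (1, 0), (1, 1)]

-- the inner j-loop of B, mutating the density row drow in place
def pvBInner (row nrow : List (Option Int)) (dj cols : Int) (drow : List Int) : List Int :=
  (PySem.List.pyRange (max 0 (-dj)) (cols - max 0 dj)).foldl
    (fun r j =>
      let v := PySem.List.pyGetD row j none
      if v ≠ none ∧ PySem.List.pyGetD nrow (j + dj) none == v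
      then r.modify j.toNat (· + 1) else r) drow

-- one direction (di,dj): the i-loop over the clipped row window
def pvBStep (grid : List (List (Option Int))) (rows cols : Int)
    (m : List (List Int)) (d : Int × Int) : List (List Int) :=
  (PySem.List.pyRange (max 0 (-d.1)) (rows - max 0 d.1)).foldl
    (fun m i =>
      m.modify i.toNat
        (pvBInner (PySem.List.pyGetD grid i []) (PySem.List.pyGetD grid (i + d.1) []) d.2 cols)) m

def grid_density_alt (grid : List (List (Option Int))) : List (List Int) :=
  let rows : Int := grid.length
  let cols : Int := (PySem.List.pyGetD grid 0 []).length
  pvOffsets.foldl (pvBStep grid rows cols)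
    (List.replicate rows.toNat (List.replicate cols.toNat (0 : Int)))

-- ===== PRECONDITION & SPEC =====
-- Pre_ excludes exactly the inputs on which A raises IndexError: the empty grid
-- (grid[0]) and grids where some row is shorter than row 0 (grid[i][j], j < cols).
def Pre_grid_density (grid : List (List (Option Int))) : Prop :=
  grid ≠ [] ∧ ∀ r ∈ grid, (PySem.List.pyGetD grid 0 []).length ≤ r.length
instance (grid : List (List (Option Int))) : Decidable (Pre_grid_density grid) := by
  unfold Pre_grid_density; infer_instance

def pvWitness_grid_density : List (List (Option Int)) :=
  [[some 1, none], [some 1, some 1]]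

def Spec_grid_density (grid : List (List (Option Int))) (out : List (List Int)) : Prop := out = grid_density_alt grid
instance (grid : List (List (Option Int))) (out : List (List Int)) : Decidable (Spec_grid_density grid out) := by unfold Spec_grid_density; infer_instance

-- ===== CLAIM (what is proved, stated in full; the proofs are below) =====
def Claim_equal_grid_density : Prop := ∀ (grid : List (List (Option Int))), Dom_grid_density grid → Pre_grid_density grid → Spec_grid_density grid (grid_density grid)

-- ===== LEMMAS AND PROOFS =====

theorem pv_modify_if {α : Type} (c : Prop) [Decidable c] (g : α → α) (n : Nat) (r : List α) :
    (if c then r.modify n g else r) = r.modify n (fun v => if c then g v else v) := by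
  refine (List.ext_getElem? fun i => ?_).symm
  rw [List.getElem?_modify]
  by_cases hc : c
  · rw [if_pos hc, List.getElem?_modify]
    cases r[i]? <;> simp [hc]
  · rw [if_neg hc]
    cases r[i]? <;> simp [hc]

-- entry characterization of a fold of single-index modifications over a range
theorem pv_foldl_modify_getElem? {α : Type} (f : Int → α → α) :
    ∀ (n : Nat) (lo hi : Int), 0 ≤ lo → (hi - lo).toNat = n → ∀ (m : List α) (k : Nat),
    ((PySem.List.pyRange lo hi).foldl (fun m i => m.modify i.toNat (f i)) m)[k]? =
      if lo ≤ (k : Int) ∧ (k : Int) < hi then (m[k]?).map (f k) else m[k]? := by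
  intro n
  induction n with
  | zero =>
    intro lo hi h0 hn m k
    rw [PySem.List.pyRange_one_eq_nil (by omega)]
    simp only [List.foldl_nil]
    rw [if_neg (by omega)]
  | succ n ih =>
    intro lo hi h0 hn m k
    rw [PySem.List.pyRange_one_cons (by omega)]
    simp only [List.foldl_cons]
    rw [ih (lo + 1) hi (by omega) (by omega), List.getElem?_modify]
    by_cases h1 : lo + 1 ≤ (k : Int) ∧ (k : Int) < hi
    · rw [if_pos h1, if_pos (by omega)]
      have hne : lo.toNat ≠ k := by omega
      cases m[k]? <;> simp [hne]
    · rw [if_neg h1]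
      by_cases h2 : (k : Int) = lo ∧ (k : Int) < hi
      · rw [if_pos (by omega)]
        have he : lo = (k : Int) := by omega
        subst he
        cases m[k]? <;> simp
      · rw [if_neg (by omega)]
        have hne : lo.toNat ≠ k := by omega
        cases m[k]? <;> simp [hne]

theorem pv_foldl_modify_length {α : Type} (f : Int → α → α) (L : List Int) (m : List α) :
    (L.foldl (fun m i => m.modify i.toNat (f i)) m).length = m.length := by
  induction L generalizing m with
  | nil => rfl
  | cons a L ih => simp [List.foldl_cons, ih, List.length_modify]

-- per-direction, per-cell increment
def pvInd (grid : List (List (Option Int))) (rows cols : Int) (d : Int × Int) (i j : Int) : Int :=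
  if (0 ≤ i + d.1 ∧ i + d.1 < rows ∧ 0 ≤ j + d.2 ∧ j + d.2 < cols)
      ∧ pvGet2 grid i j ≠ none
      ∧ pvGet2 grid (i + d.1) (j + d.2) == pvGet2 grid i j
  then 1 else 0

def pvEntry (m : List (List Int)) (i j : Nat) : Option Int :=
  m[i]?.bind (fun r => r[j]?)

theorem pvBInner_getElem? (row nrow : List (Option Int)) (dj cols : Int) (drow : List Int) (k : Nat) :
    (pvBInner row nrow dj cols drow)[k]? =
      if max 0 (-dj) ≤ (k : Int) ∧ (k : Int) < cols - max 0 dj then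
        (drow[k]?).map (fun v =>
          if PySem.List.pyGetD row (k : Int) none ≠ none ∧
             PySem.List.pyGetD nrow ((k : Int) + dj) none == PySem.List.pyGetD row (k : Int) none
          then v + 1 else v)
      else drow[k]? := by
  unfold pvBInner
  have : ∀ (r : List Int) (j : Int),
      (if PySem.List.pyGetD row j none ≠ none ∧
          PySem.List.pyGetD nrow (j + dj) none == PySem.List.pyGetD row j none
       then r.modify j.toNat (· + 1) else r) =
      r.modify j.toNat (fun v =>
        if PySem.List.pyGetD row j none ≠ none ∧
           PySem.List.pyGetD nrow (j + dj) none == PySem.List.pyGetD row j none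
        then v + 1 else v) := by
    intro r j; exact pv_modify_if _ _ _ _
  simp only [this]
  exact pv_foldl_modify_getElem? _ _ _ _ (by omega) rfl drow k

theorem pvBStep_getElem? (grid : List (List (Option Int))) (rows cols : Int)
    (m : List (List Int)) (d : Int × Int) (k : Nat) :
    (pvBStep grid rows cols m d)[k]? =
      if max 0 (-d.1) ≤ (k : Int) ∧ (k : Int) < rows - max 0 d.1 then
        (m[k]?).map (pvBInner (PySem.List.pyGetD grid (k : Int) [])
          (PySem.List.pyGetD grid ((k : Int) + d.1) []) d.2 cols)
      else m[k]? := by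
  unfold pvBStep
  exact pv_foldl_modify_getElem? _ _ _ _ (by omega) rfl m k

theorem pvBStep_entry (grid : List (List (Option Int))) (rows cols : Int)
    (m : List (List Int)) (d : Int × Int) (i j : Nat)
    (hi : (i : Int) < rows) (hj : (j : Int) < cols) :
    pvEntry (pvBStep grid rows cols m d) i j =
      (pvEntry m i j).map (fun v => v + pvInd grid rows cols d (i : Int) (j : Int)) := by
  unfold pvEntry pvInd
  rw [pvBStep_getElem? grid rows cols m d i]
  by_cases hiw : max 0 (-d.1) ≤ (i : Int) ∧ (i : Int) < rows - max 0 d.1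
  · rw [if_pos hiw]
    cases hrow : m[i]? with
    | none => rfl
    | some r =>
      simp only [Option.map_some, Option.bind_some]
      rw [pvBInner_getElem?]
      by_cases hjw : max 0 (-d.2) ≤ (j : Int) ∧ (j : Int) < cols - max 0 d.2
      · rw [if_pos hjw]
        cases hr : r[j]? with
        | none => rfl
        | some v =>
          simp only [Option.map_some]
          congr 1
          have hb : (0 ≤ (i : Int) + d.1 ∧ (i : Int) + d.1 < rows ∧
              0 ≤ (j : Int) + d.2 ∧ (j : Int) + d.2 < cols) := by omega
          unfold pvGet2
          by_cases hc : PySem.List.pyGetD (PySem.List.pyGetD grid (i : Int) []) (j : Int) none ≠ none ∧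
              PySem.List.pyGetD (PySem.List.pyGetD grid ((i : Int) + d.1) []) ((j : Int) + d.2) none ==
                PySem.List.pyGetD (PySem.List.pyGetD grid (i : Int) []) (j : Int) none
          · rw [if_pos hc, if_pos ⟨hb, hc⟩]
          · rw [if_neg hc, if_neg (by tauto)]; omega
      · rw [if_neg hjw]
        cases hr : r[j]? with
        | none => rfl
        | some v =>
          simp only [Option.map_some]
          congr 1
          rw [if_neg (by omega)]; omega
  · rw [if_neg hiw]
    cases hrow : m[i]? with
    | none => rfl
    | some r =>
      simp only [Option.bind_some]
      cases hr : r[j]? with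
      | none => rfl
      | some v =>
        simp only [Option.map_some]
        congr 1
        rw [if_neg (by omega)]; omega

theorem pv_foldl_steps_entry (grid : List (List (Option Int))) (rows cols : Int)
    (L : List (Int × Int)) (m : List (List Int)) (i j : Nat)
    (hi : (i : Int) < rows) (hj : (j : Int) < cols) :
    pvEntry (L.foldl (pvBStep grid rows cols) m) i j =
      (pvEntry m i j).map
        (fun v => L.foldl (fun c d => c + pvInd grid rows cols d (i : Int) (j : Int)) v) := by
  induction L generalizing m with
  | nil => cases h : pvEntry m i j <;> simp [h]
  | cons d L ih =>
    simp only [List.foldl_cons]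
    rw [ih (pvBStep grid rows cols m d), pvBStep_entry grid rows cols m d i j hi hj]
    cases h : pvEntry m i j <;> simp

-- lengths of B's result
theorem pvBInner_length (row nrow : List (Option Int)) (dj cols : Int) (drow : List Int) :
    (pvBInner row nrow dj cols drow).length = drow.length := by
  unfold pvBInner
  induction PySem.List.pyRange (max 0 (-dj)) (cols - max 0 dj) generalizing drow with
  | nil => rfl
  | cons a L ih =>
    simp only [List.foldl_cons]
    rw [ih]
    split_ifs <;> simp [List.length_modify]

theorem pvBStep_length (grid : List (List (Option Int))) (rows cols : Int)
    (m : List (List Int)) (d : Int × Int) :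
    (pvBStep grid rows cols m d).length = m.length := by
  unfold pvBStep
  exact pv_foldl_modify_length _ _ _

theorem pv_alt_length (grid : List (List (Option Int))) (rows cols : Int) (L : List (Int × Int))
    (m : List (List Int)) :
    (L.foldl (pvBStep grid rows cols) m).length = m.length := by
  induction L generalizing m with
  | nil => rfl
  | cons d L ih => simp [List.foldl_cons, ih, pvBStep_length]

theorem pv_alt_row_length (grid : List (List (Option Int))) (rows cols : Int) (L : List (Int × Int))
    (m : List (List Int)) (i : Nat) (r : List Int)
    (h : (L.foldl (pvBStep grid rows cols) m)[i]? = some r) :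
    ∃ r0, m[i]? = some r0 ∧ r.length = r0.length := by
  induction L generalizing m r with
  | nil => exact ⟨r, h, rfl⟩
  | cons d L ih =>
    simp only [List.foldl_cons] at h
    obtain ⟨r1, h1, hlen1⟩ := ih (pvBStep grid rows cols m d) r h
    rw [pvBStep_getElem? grid rows cols m d i] at h1
    split_ifs at h1 with hw
    · cases h0 : m[i]? with
      | none => rw [h0] at h1; simp at h1
      | some r0 =>
        rw [h0] at h1
        simp only [Option.map_some, Option.some.injEq] at h1
        exact ⟨r0, rfl, by rw [hlen1, ← h1, pvBInner_length]⟩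
    · exact ⟨r1, h1, hlen1⟩

-- A's per-cell count equals the fold of pvInd over the same offset list
theorem pv_cell_eq (grid : List (List (Option Int))) (rows cols : Int) (i j : Int)
    (hcur : pvGet2 grid i j ≠ none) (L : List (Int × Int)) : ∀ (c : Int),
    (((L.map (fun d => (i + d.1, j + d.2))).filter
        (fun p => pvIsValid p.1 p.2 rows cols)).foldl
      (fun c p => if pvGet2 grid p.1 p.2 == pvGet2 grid i j then c + 1 else c) c) =
    L.foldl (fun c d => c + pvInd grid rows cols d i j) c := by
  induction L with
  | nil => intro c; rfl
  | cons d L ih =>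
    intro c
    simp only [List.map_cons, List.filter_cons]
    by_cases hv : (0 ≤ i + d.1 ∧ i + d.1 < rows ∧ 0 ≤ j + d.2 ∧ j + d.2 < cols)
    · rw [if_pos (by simpa [pvIsValid] using hv)]
      simp only [List.foldl_cons]
      rw [ih]
      congr 1
      unfold pvInd
      by_cases he : pvGet2 grid (i + d.1) (j + d.2) == pvGet2 grid i j
      · rw [if_pos he, if_pos ⟨hv, hcur, he⟩]
      · rw [if_neg he, if_neg (by tauto)]; omega
    · rw [if_neg (by simpa [pvIsValid] using hv)]
      simp only [List.foldl_cons]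
      rw [ih]
      congr 1
      unfold pvInd
      rw [if_neg (by tauto)]
      omega

theorem pv_neighbors_eq (i j rows cols : Int) :
    pvGetNeighbors i j rows cols =
      (pvOffsets.map (fun d => (i + d.1, j + d.2))).filter
        (fun p => pvIsValid p.1 p.2 rows cols) := by
  unfold pvGetNeighbors pvOffsets
  simp only [List.map_cons, List.map_nil, sub_eq_add_neg, add_zero]

theorem pv_fold_ind_none (grid : List (List (Option Int))) (rows cols i j : Int)
    (h : pvGet2 grid i j = none) :
    ∀ (L : List (Int × Int)) (c : Int),
      L.foldl (fun c d => c + pvInd grid rows cols d i j) c = c := by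
  intro L
  induction L with
  | nil => intro c; rfl
  | cons d L ih =>
    intro c
    simp only [List.foldl_cons]
    rw [show pvInd grid rows cols d i j = 0 from by unfold pvInd; rw [if_neg (by tauto)],
      add_zero, ih]

-- ===== VERDICT (by name: the statement is the Claim_ definition above) =====
theorem grid_density_spec : Claim_equal_grid_density := by
  intro grid _ _
  unfold Spec_grid_density
  simp only [grid_density, grid_density_alt, Int.toNat_natCast]
  set cl := (PySem.List.pyGetD grid 0 ([] : List (Option Int))).length with hcl
  set M := pvOffsets.foldl (pvBStep grid (grid.length : Int) (cl : Int))
    (List.replicate grid.length (List.replicate cl (0 : Int))) with hMdef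
  have hMlen : M.length = grid.length := by
    rw [hMdef, pv_alt_length]; simp
  refine List.ext_getElem? fun i => ?_
  by_cases hi : i < grid.length
  · rw [PySem.List.getElem?_map_pyRange_zero _ grid.length i hi]
    obtain ⟨rB, hrB⟩ : ∃ rB, M[i]? = some rB :=
      ⟨M[i]'(by omega), List.getElem?_eq_getElem (by omega)⟩
    rw [hrB]
    have hrBlen : rB.length = cl := by
      obtain ⟨r0, hr0, hlen⟩ := pv_alt_row_length grid _ _ pvOffsets _ i rB (hMdef ▸ hrB)
      rw [List.getElem?_replicate, if_pos hi] at hr0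
      cases hr0
      simpa using hlen
    congr 1
    refine List.ext_getElem? fun j => ?_
    by_cases hj : j < cl
    · rw [PySem.List.getElem?_map_pyRange_zero _ cl j hj]
      have hE : pvEntry M i j =
          some (pvOffsets.foldl
            (fun c d => c + pvInd grid (grid.length : Int) (cl : Int) d (i : Int) (j : Int)) 0) := by
        rw [hMdef, pv_foldl_steps_entry grid _ _ pvOffsets _ i j (by exact_mod_cast hi)
          (by exact_mod_cast hj)]
        unfold pvEntry
        rw [List.getElem?_replicate, if_pos hi]
        simp [hj]
      have hrj : rB[j]? =
          some (pvOffsets.foldl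
            (fun c d => c + pvInd grid (grid.length : Int) (cl : Int) d (i : Int) (j : Int)) 0) := by
        unfold pvEntry at hE
        rw [hrB] at hE
        simpa using hE
      rw [hrj]
      congr 1
      by_cases hcur : pvGet2 grid (i : Int) (j : Int) = none
      · rw [if_neg (by simp [hcur]), pv_fold_ind_none grid _ _ _ _ hcur]
      · rw [if_pos hcur, pv_neighbors_eq, pv_cell_eq grid _ _ _ _ hcur pvOffsets 0]
    · rw [List.getElem?_eq_none (by simp [PySem.List.length_pyRange_one]; omega),
        List.getElem?_eq_none (by omega)]
  · rw [List.getElem?_eq_none (by simp [PySem.List.length_pyRange_one]; omega),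
      List.getElem?_eq_none (by omega)]
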